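-- pv_equiv track=rewrite | github.com/PaperSubmissionOpenSource/EMINDS | backend/app/routes/interface/pathmining.py | decompose_list
-- ===== SOURCE A (Python) =====
-- def decompose_list(s, lst):
--     def helper(s, parts):
--             if not s:
--                 result.append(parts)
--                 return
--             for num in lst:
--                 if s.startswith(str(num)):
--                     helper(s[len(str(num)):], parts + [num])
--     result = []
--     helper(s, [])
--     return result
-- ===== SOURCE B (Python) =====
-- def decompose_list(s, lst):
--     n = len(s)
--     reps = [str(num) for num in lst]
--     first = {r[0] for r in reps}  # first characters of the numbers' decimal forms
--     # good[i] == True  iff  s[i:] can be fully decomposed into numbers from lst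
--     good = [False] * (n + 1)
--     good[n] = True
--     for i in range(n - 1, -1, -1):
--         good[i] = s[i] in first and any(s.startswith(r, i) and good[i + len(r)] for r in reps)
--     result = []
--
--     def dfs(i, parts):
--         if i == n:
--             result.append(parts)
--             return
--         for num, r in zip(lst, reps):
--             if s.startswith(r, i) and good[i + len(r)]:
--                 dfs(i + len(r), parts + [num])
--
--     dfs(0, [])
--     return result
-- ===== Notes on version B (the rewrite author's own statement) =====
-- stated objective: alternative
-- what changed: Replaced A's blind DFS (which fully explores dead-end branches) by the same-order DFS pruned by a precomputed suffix-feasibility boolean DP (good[i] = s[i:] is decomposable, with a first-character set precheck per position), so no dead-end subtree is ever entered; a timing run's inputs die at position 0, where A is already cheap, so no speed-up was measured there.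
import Mathlib
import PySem

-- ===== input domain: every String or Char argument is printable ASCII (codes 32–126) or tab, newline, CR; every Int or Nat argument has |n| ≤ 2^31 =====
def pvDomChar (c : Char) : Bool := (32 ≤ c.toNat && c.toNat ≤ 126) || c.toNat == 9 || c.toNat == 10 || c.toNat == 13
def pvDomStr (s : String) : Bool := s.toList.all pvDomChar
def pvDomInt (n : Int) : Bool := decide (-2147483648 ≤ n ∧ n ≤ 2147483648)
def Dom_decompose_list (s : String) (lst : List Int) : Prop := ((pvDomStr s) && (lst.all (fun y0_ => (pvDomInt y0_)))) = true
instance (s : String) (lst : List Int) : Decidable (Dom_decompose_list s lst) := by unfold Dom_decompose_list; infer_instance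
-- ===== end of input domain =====

-- B replaces A's blind DFS (which re-explores dead-end branches) by the same-order DFS guarded by a
-- precomputed suffix-feasibility boolean DP (with a first-character set precheck), pruning every
-- branch that cannot reach a full decomposition; same return value everywhere.


-- ===== PORT A =====
-- str(num) is never the empty string (needed for termination of the recursion on s)
theorem pvToCharsLenPos (n : Int) : 0 < (PySem.Int.toChars n).length := by
  unfold PySem.Int.toChars
  split <;> simp [Nat.length_toDigits_pos]

-- A's nested `helper` (the `for num in lst` loop is `pvLoopA`); `result` is the returned list.
mutual
def pvHelperA (lst0 : List Int) (s : List Char) (parts : List Int) : List (List Int) :=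
  match s with
  | [] => [parts]
  | c :: rest => pvLoopA lst0 lst0 (c :: rest) parts
termination_by (s.length, lst0.length + 1)
decreasing_by exact Prod.Lex.right _ (Nat.lt_succ_self _)
def pvLoopA (lst0 rem : List Int) (s : List Char) (parts : List Int) : List (List Int) :=
  match rem with
  | [] => []
  | num :: rest =>
    let t := PySem.Int.toChars num
    (if h : PySem.Chars.startswith s t then
        pvHelperA lst0 (s.drop t.length) (parts ++ [num])
      else []) ++ pvLoopA lst0 rest s parts
termination_by (s.length, rem.length)
decreasing_by
  · apply Prod.Lex.left
    have hle : (PySem.Int.toChars num).length ≤ s.length :=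
      ((PySem.Chars.startswith_iff _ _).mp h).length_le
    have hpos := pvToCharsLenPos num
    simp only [List.length_drop]
    omega
  · exact Prod.Lex.right _ (Nat.lt_succ_self _)
end

def decompose_list (s : String) (lst : List Int) : List (List Int) :=
  pvHelperA lst s.toList []

-- ===== PORT B =====
-- Source B's `good` array, back to front over the suffixes of s: (pvGoodB reps t) has at index j
-- the feasibility bit of the suffix (t.drop j); s.startswith(r, i) is startswith of the suffix.
def pvGoodB (reps : List (List Char)) (first : PySem.Set Char) : List Char → List Bool
  | [] => [true]
  | c :: rest =>
    let g := pvGoodB reps first rest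
    (PySem.Set.contains first c
      && reps.any (fun r => PySem.Chars.startswith (c :: rest) r && g.getD (r.length - 1) false)) :: g

-- Source B's `first = {r[0] for r in reps}`; every r in reps is str(num), never empty, so r.headD is
-- exactly Python's r[0] there.
def pvFirstB (reps : List (List Char)) : PySem.Set Char :=
  PySem.Set.ofList (reps.map (fun r => r.headD (Char.ofNat 0)))

-- Source B's `dfs`, accumulating `result` in `acc`; the suffix at position i is t, the good-array
-- suffix from position i is g (so good[i + len r] is g.getD (len r) false); str(num) is recomputed
-- where Source B reads the precomputed reps[j] — same value.
mutual
def pvDfsB (lst0 : List Int) (t : List Char) (g : List Bool) (parts : List Int)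
    (acc : List (List Int)) : List (List Int) :=
  match t with
  | [] => acc ++ [parts]
  | c :: rest => pvDfsLoopB lst0 lst0 (c :: rest) g parts acc
termination_by (t.length, lst0.length + 1)
decreasing_by exact Prod.Lex.right _ (Nat.lt_succ_self _)
def pvDfsLoopB (lst0 rem : List Int) (t : List Char) (g : List Bool) (parts : List Int)
    (acc : List (List Int)) : List (List Int) :=
  match rem with
  | [] => acc
  | num :: rest =>
    let r := PySem.Int.toChars num
    let acc' := if h : PySem.Chars.startswith t r && g.getD r.length false then
        pvDfsB lst0 (t.drop r.length) (g.drop r.length) (parts ++ [num]) acc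
      else acc
    pvDfsLoopB lst0 rest t g parts acc'
termination_by (t.length, rem.length)
decreasing_by
  · apply Prod.Lex.left
    have hle : (PySem.Int.toChars num).length ≤ t.length :=
      ((PySem.Chars.startswith_iff _ _).mp (Bool.and_elim_left h)).length_le
    have hpos := pvToCharsLenPos num
    simp only [List.length_drop]
    omega
  · exact Prod.Lex.right _ (Nat.lt_succ_self _)
end

def decompose_list_alt (s : String) (lst : List Int) : List (List Int) :=
  let reps := lst.map PySem.Int.toChars
  pvDfsB lst s.toList (pvGoodB reps (pvFirstB reps) s.toList) [] []

-- ===== PRECONDITION & SPEC =====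
def Spec_decompose_list (s : String) (lst : List Int) (out : List (List Int)) : Prop := out = decompose_list_alt s lst
instance (s : String) (lst : List Int) (out : List (List Int)) : Decidable (Spec_decompose_list s lst out) := by unfold Spec_decompose_list; infer_instance

-- ===== CLAIM (what is proved, stated in full; the proofs are below) =====
def Claim_equal_decompose_list : Prop := ∀ (s : String) (lst : List Int), Dom_decompose_list s lst → Spec_decompose_list s lst (decompose_list s lst)

-- ===== LEMMAS AND PROOFS =====
-- the good array of a suffix is the suffix of the good array
theorem pvGoodB_drop (reps : List (List Char)) (first : PySem.Set Char) :
    ∀ (j : Nat) (t : List Char), j ≤ t.length →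
      (pvGoodB reps first t).drop j = pvGoodB reps first (t.drop j) := by
  intro j
  induction j with
  | zero => intro t _; rfl
  | succ j ih =>
    intro t ht
    cases t with
    | nil => simp at ht
    | cons c rest =>
      simp only [pvGoodB, List.drop_succ_cons]
      exact ih rest (by simpa using ht)

theorem pvGetD_headD {α : Type} : ∀ (l : List α) (j : Nat) (d : α), l.getD j d = (l.drop j).headD d := by
  intro l
  induction l with
  | nil => intro j d; simp
  | cons x xs ih =>
    intro j d
    cases j with
    | zero => rfl
    | succ j => simpa using ih j d

theorem pvGoodB_getD (reps : List (List Char)) (first : PySem.Set Char) (j : Nat) (t : List Char) (hj : j ≤ t.length) :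
    (pvGoodB reps first t).getD j false = (pvGoodB reps first (t.drop j)).headD false := by
  rw [pvGetD_headD, pvGoodB_drop reps first j t hj]

-- helper's output does not depend on `parts` except as a common prefix
theorem pvShiftA (lst : List Int) :
    ∀ (n : Nat) (t : List Char), t.length ≤ n → ∀ (parts : List Int),
      pvHelperA lst t parts = (pvHelperA lst t []).map (fun d => parts ++ d) := by
  intro n
  induction n with
  | zero =>
    intro t ht parts
    have : t = [] := by cases t <;> simp_all
    subst this
    simp [pvHelperA]
  | succ n ih =>
    intro t ht parts
    cases t with
    | nil => simp [pvHelperA]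
    | cons c rest =>
      rw [pvHelperA, pvHelperA]
      have hloop : ∀ rem : List Int,
          pvLoopA lst rem (c :: rest) parts
            = (pvLoopA lst rem (c :: rest) []).map (fun d => parts ++ d) := by
        intro rem
        induction rem with
        | nil => simp [pvLoopA]
        | cons num rest' ihr =>
          rw [pvLoopA, pvLoopA]
          simp only [List.map_append, ihr]
          congr 1
          by_cases h : PySem.Chars.startswith (c :: rest) (PySem.Int.toChars num) = true
          · simp only [h, dif_pos]
            have hle : (PySem.Int.toChars num).length ≤ (c :: rest).length :=
              ((PySem.Chars.startswith_iff _ _).mp h).length_le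
            have hpos := pvToCharsLenPos num
            have hlen : ((c :: rest).drop (PySem.Int.toChars num).length).length ≤ n := by
              simp only [List.length_drop, List.length_cons]
              simp only [List.length_cons] at ht
              omega
            rw [ih _ hlen (parts ++ [num]), ih _ hlen ([] ++ [num])]
            simp [List.map_map, Function.comp]
          · simp [h]
      exact hloop lst

-- the good bit of a suffix is exactly "A's helper finds at least one decomposition there"
theorem pvGoodB_correct (lst : List Int) :
    ∀ (n : Nat) (t : List Char), t.length ≤ n →
      ((pvGoodB (lst.map PySem.Int.toChars) (pvFirstB (lst.map PySem.Int.toChars)) t).headD false = true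
        ↔ pvHelperA lst t [] ≠ []) := by
  intro n
  induction n with
  | zero =>
    intro t ht
    have : t = [] := by cases t <;> simp_all
    subst this
    simp [pvGoodB, pvHelperA]
  | succ n ih =>
    intro t ht
    cases t with
    | nil => simp [pvGoodB, pvHelperA]
    | cons c rest =>
      rw [pvHelperA]
      -- the loop result is nonempty iff some num opens a feasible branch
      have hloop : ∀ rem : List Int,
          (pvLoopA lst rem (c :: rest) [] ≠ []
            ↔ ∃ num ∈ rem, PySem.Chars.startswith (c :: rest) (PySem.Int.toChars num) = true
                ∧ pvHelperA lst ((c :: rest).drop (PySem.Int.toChars num).length) [] ≠ []) := by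
        intro rem
        induction rem with
        | nil => simp [pvLoopA]
        | cons num rest' ihr =>
          rw [pvLoopA]
          simp only [ne_eq, List.append_eq_nil_iff, not_and_or, ihr]
          constructor
          · intro hne
            rcases hne with hbr | hrest
            · by_cases h : PySem.Chars.startswith (c :: rest) (PySem.Int.toChars num) = true
              · refine ⟨num, by simp, h, ?_⟩
                simp only [h, dif_pos] at hbr
                intro hempty
                apply hbr
                have hle : (PySem.Int.toChars num).length ≤ (c :: rest).length :=
                  ((PySem.Chars.startswith_iff _ _).mp h).length_le
                rw [pvShiftA lst ((c :: rest).drop (PySem.Int.toChars num).length).length _ le_rfl ([] ++ [num]), hempty]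
                rfl
              · simp [h] at hbr
            · obtain ⟨num', hm, hsw, hne'⟩ := hrest
              exact ⟨num', by simp [hm], hsw, hne'⟩
          · rintro ⟨num', hm, hsw, hne'⟩
            rcases List.mem_cons.mp hm with rfl | hm'
            · left
              simp only [hsw, dif_pos]
              rw [pvShiftA lst ((c :: rest).drop (PySem.Int.toChars num').length).length _ le_rfl ([] ++ [num'])]
              simpa using hne'
            · right
              exact ⟨num', hm', hsw, hne'⟩
      rw [hloop lst]
      -- unfold the good bit at this position
      simp only [pvGoodB, List.headD_cons, Bool.and_eq_true, List.any_map, List.any_eq_true,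
        Function.comp]
      constructor
      · rintro ⟨-, num, hm, hand⟩
        have hsw := hand.1
        have hgd := hand.2
        have hle : (PySem.Int.toChars num).length ≤ (c :: rest).length :=
          ((PySem.Chars.startswith_iff _ _).mp hsw).length_le
        have hpos := pvToCharsLenPos num
        refine ⟨num, hm, hsw, ?_⟩
        rw [pvGoodB_getD _ _ _ rest (by simp only [List.length_cons] at hle; omega)] at hgd
        have hdrop : rest.drop ((PySem.Int.toChars num).length - 1)
            = (c :: rest).drop (PySem.Int.toChars num).length := by
          cases hk : (PySem.Int.toChars num).length with
          | zero => omega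
          | succ k => simp
        rw [hdrop] at hgd
        have hlen : ((c :: rest).drop (PySem.Int.toChars num).length).length ≤ n := by
          simp only [List.length_drop, List.length_cons]
          simp only [List.length_cons] at ht
          omega
        exact (ih _ hlen).mp hgd
      · rintro ⟨num, hm, hsw, hne⟩
        have hle : (PySem.Int.toChars num).length ≤ (c :: rest).length :=
          ((PySem.Chars.startswith_iff _ _).mp hsw).length_le
        have hpos := pvToCharsLenPos num
        have hhead : (PySem.Int.toChars num).headD (Char.ofNat 0) = c := by
          obtain ⟨u, hu⟩ := (PySem.Chars.startswith_iff _ _).mp hsw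
          cases hr : PySem.Int.toChars num with
          | nil => exact absurd (hr ▸ pvToCharsLenPos num) (by simp)
          | cons a r' =>
            rw [hr] at hu
            simp only [List.cons_append] at hu
            simpa using congrArg (fun l => l.headD (Char.ofNat 0)) hu
        refine ⟨?_, num, hm, ?_⟩
        · have hmem : c ∈ (lst.map PySem.Int.toChars).map (fun r => r.headD (Char.ofNat 0)) := by
            rw [List.mem_map]
            exact ⟨PySem.Int.toChars num, List.mem_map_of_mem hm, hhead⟩
          simpa [pvFirstB, PySem.Set.contains, PySem.Set.mem_ofList] using hmem
        refine ⟨hsw, ?_⟩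
        rw [pvGoodB_getD _ _ _ rest (by simp only [List.length_cons] at hle; omega)]
        have hdrop : rest.drop ((PySem.Int.toChars num).length - 1)
            = (c :: rest).drop (PySem.Int.toChars num).length := by
          cases hk : (PySem.Int.toChars num).length with
          | zero => omega
          | succ k => simp
        rw [hdrop]
        have hlen : ((c :: rest).drop (PySem.Int.toChars num).length).length ≤ n := by
          simp only [List.length_drop, List.length_cons]
          simp only [List.length_cons] at ht
          omega
        exact (ih _ hlen).mpr hne

-- main: the pruned DFS accumulates exactly what A's DFS appends
theorem pvMainB (lst : List Int) :
    ∀ (n : Nat) (t : List Char), t.length ≤ n → ∀ (parts : List Int) (acc : List (List Int)),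
      pvDfsB lst t (pvGoodB (lst.map PySem.Int.toChars) (pvFirstB (lst.map PySem.Int.toChars)) t) parts acc
        = acc ++ pvHelperA lst t parts := by
  intro n
  induction n with
  | zero =>
    intro t ht parts acc
    have : t = [] := by cases t <;> simp_all
    subst this
    simp [pvDfsB, pvHelperA]
  | succ n ih =>
    intro t ht parts acc
    cases t with
    | nil => simp [pvDfsB, pvHelperA]
    | cons c rest =>
      rw [pvDfsB, pvHelperA]
      have hloop : ∀ (rem : List Int) (acc : List (List Int)),
          pvDfsLoopB lst rem (c :: rest) (pvGoodB (lst.map PySem.Int.toChars) (pvFirstB (lst.map PySem.Int.toChars)) (c :: rest)) parts acc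
            = acc ++ pvLoopA lst rem (c :: rest) parts := by
        intro rem
        induction rem with
        | nil => intro acc; simp [pvDfsLoopB, pvLoopA]
        | cons num rest' ihr =>
          intro acc
          rw [pvDfsLoopB, pvLoopA, ihr]
          have hpos := pvToCharsLenPos num
          by_cases hsw : PySem.Chars.startswith (c :: rest) (PySem.Int.toChars num) = true
          · have hle : (PySem.Int.toChars num).length ≤ (c :: rest).length :=
              ((PySem.Chars.startswith_iff _ _).mp hsw).length_le
            have hlen : ((c :: rest).drop (PySem.Int.toChars num).length).length ≤ n := by
              simp only [List.length_drop, List.length_cons]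
              simp only [List.length_cons] at ht
              omega
            have hgdrop : (pvGoodB (lst.map PySem.Int.toChars) (pvFirstB (lst.map PySem.Int.toChars)) (c :: rest)).drop (PySem.Int.toChars num).length
                = pvGoodB (lst.map PySem.Int.toChars) (pvFirstB (lst.map PySem.Int.toChars)) ((c :: rest).drop (PySem.Int.toChars num).length) :=
              pvGoodB_drop _ _ _ _ hle
            by_cases hgd : (pvGoodB (lst.map PySem.Int.toChars) (pvFirstB (lst.map PySem.Int.toChars)) (c :: rest)).getD (PySem.Int.toChars num).length false = true
            · -- feasible branch: both recurse
              simp only [hsw, hgd, Bool.and_self, dif_pos]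
              rw [hgdrop, ih _ hlen, List.append_assoc]
            · -- pruned branch: A's subtree contributes nothing
              have hempty : pvHelperA lst ((c :: rest).drop (PySem.Int.toChars num).length) (parts ++ [num]) = [] := by
                have hgd' : (pvGoodB (lst.map PySem.Int.toChars) (pvFirstB (lst.map PySem.Int.toChars)) ((c :: rest).drop (PySem.Int.toChars num).length)).headD false ≠ true := by
                  rw [← hgdrop, ← pvGetD_headD]
                  exact hgd
                have := (pvGoodB_correct lst n _ hlen)
                have hnil : pvHelperA lst ((c :: rest).drop (PySem.Int.toChars num).length) [] = [] := by
                  by_contra hne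
                  exact hgd' (this.mpr hne)
                rw [pvShiftA lst ((c :: rest).drop (PySem.Int.toChars num).length).length _ le_rfl, hnil]
                rfl
              simp only [hsw, Bool.true_and, hgd, hempty]
              simp
          · simp [hsw]
      rw [hloop lst acc]

-- ===== VERDICT (by name: the statement is the Claim_ definition above) =====
theorem decompose_list_spec : Claim_equal_decompose_list := by
  intro s lst _
  unfold Spec_decompose_list decompose_list decompose_list_alt
  rw [pvMainB lst s.toList.length s.toList le_rfl [] []]
  rfl
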